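-- pv_equiv track=rewrite | github.com/ManushiKhatri/LearningDSA | codesignal/beautiful_matrix.py | solution
-- ===== SOURCE A (Python) =====
-- def beauty(matrix):
--     # Find the beauty of a 2x2 matrix
--     values = set(matrix[0] + matrix[1])
--     i = 1
--     while i in values:
--         i += 1
--     return i
--
-- def solution(numbers):
--     # Number of submatrices
--     n = len(numbers[0]) // 2
--
--     # Compute beauty for each submatrix and store with its index
--     beauties = [(beauty([numbers[0][i*2:i*2+2], numbers[1][i*2:i*2+2]]), i) for i in range(n)]
--
--     # Sort by beauty
--     beauties.sort(key=lambda x: x[0])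
--
--     # Construct the new matrix using sorted indices
--     new_matrix = [[], []]
--     for _, idx in beauties:
--         new_matrix[0].extend(numbers[0][idx*2:idx*2+2])
--         new_matrix[1].extend(numbers[1][idx*2:idx*2+2])
--
--     return new_matrix
--
-- numbers = [[1, 2, 2, 3, 2, 10, 1, 2], [3, 4, 10, 2, 5, 4, 4, 1]]
-- ===== SOURCE B (Python) =====
-- def solution(numbers):
--     # One stable counting-sort pass: beauty of a 2x2 block is the least positive int missing from
--     # its (at most 4) values, so it always lies in 1..5 -> one pass into 5 buckets.
--     row0, row1 = numbers[0], numbers[1]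
--     n = len(row0) // 2
--     buckets = [[], [], [], [], []]
--     for i in range(n):
--         vals = set(row0[i * 2:i * 2 + 2] + row1[i * 2:i * 2 + 2])
--         m = 1
--         while m in vals:
--             m += 1
--         buckets[m - 1].append(i)
--     top, bot = [], []
--     for bucket in buckets:
--         for i in bucket:
--             top += row0[i * 2:i * 2 + 2]
--             bot += row1[i * 2:i * 2 + 2]
--     return [top, bot]
-- ===== Notes on version B (the rewrite author's own statement) =====
-- stated objective: alternative
-- what changed: Replaces building an index list and comparison-sorting it by beauty with a single stable counting-sort pass into 5 buckets (a 2x2 block's beauty is the least missing positive of at most 4 values, so it is always in 1..5), then emits the blocks bucket by bucket.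
-- outside the precondition, e.g. on solution([[1]]): A returns [[], []], B raises IndexError; on solution([]): A raises IndexError, B raises IndexError
import Mathlib
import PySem

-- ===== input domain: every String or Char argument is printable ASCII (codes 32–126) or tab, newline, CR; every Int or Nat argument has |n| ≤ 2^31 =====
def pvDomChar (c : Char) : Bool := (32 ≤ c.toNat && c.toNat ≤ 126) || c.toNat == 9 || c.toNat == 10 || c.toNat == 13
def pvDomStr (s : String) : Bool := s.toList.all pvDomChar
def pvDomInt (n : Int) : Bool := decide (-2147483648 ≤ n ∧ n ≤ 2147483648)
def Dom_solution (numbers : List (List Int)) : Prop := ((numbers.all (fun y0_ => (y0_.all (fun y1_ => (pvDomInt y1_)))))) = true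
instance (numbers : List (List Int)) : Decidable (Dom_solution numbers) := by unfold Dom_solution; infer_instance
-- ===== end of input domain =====

-- B replaces A's comparison sort of the blocks by beauty with a single stable
-- counting-sort pass into 5 buckets (a 2x2 block's beauty always lies in 1..5).


-- ===== PORT A =====
-- 'while i in values: i += 1' — fuel |values|+1 suffices (the distinct values can block at most |values| steps)
def mexGo (vals : List Int) : Nat → Int → Int
  | 0, i => i
  | f+1, i => if vals.contains i then mexGo vals f (i+1) else i

def pyMex (vals : List Int) : Int := mexGo vals (vals.length + 1) 1

def beautyA (matrix : List (List Int)) : Int :=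
  pyMex (PySem.Set.ofList (PySem.List.pyGetD matrix 0 [] ++ PySem.List.pyGetD matrix 1 []))

def solution (numbers : List (List Int)) : List (List Int) :=
  let row0 := PySem.List.pyGetD numbers 0 []
  let row1 := PySem.List.pyGetD numbers 1 []
  let n : Int := PySem.Int.floordiv (PySem.List.len row0) 2
  let beauties := (PySem.List.pyRange 0 n 1).map (fun i =>
      (beautyA [PySem.List.slice row0 (some (i*2)) (some (i*2+2)),
                PySem.List.slice row1 (some (i*2)) (some (i*2+2))], i))
  let sortedB := PySem.List.sorted beauties (fun x => x.1) false
  let nm := sortedB.foldl (fun (acc : List Int × List Int) p =>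
      (acc.1 ++ PySem.List.slice row0 (some (p.2*2)) (some (p.2*2+2)),
       acc.2 ++ PySem.List.slice row1 (some (p.2*2)) (some (p.2*2+2)))) ([], [])
  [nm.1, nm.2]

-- ===== PORT B =====
def solution_alt (numbers : List (List Int)) : List (List Int) :=
  let row0 := PySem.List.pyGetD numbers 0 []
  let row1 := PySem.List.pyGetD numbers 1 []
  let n : Int := PySem.Int.floordiv (PySem.List.len row0) 2
  let buckets := (PySem.List.pyRange 0 n 1).foldl (fun (bs : List (List Int)) i =>
      let vals := PySem.Set.ofList (PySem.List.slice row0 (some (i*2)) (some (i*2+2)) ++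
                                    PySem.List.slice row1 (some (i*2)) (some (i*2+2)))
      let m := pyMex vals
      PySem.List.pySetD bs (m-1) (PySem.List.pyGetD bs (m-1) [] ++ [i]))
    [[], [], [], [], []]
  let tb := buckets.foldl (fun (acc : List Int × List Int) bucket =>
      bucket.foldl (fun (acc : List Int × List Int) i =>
        (acc.1 ++ PySem.List.slice row0 (some (i*2)) (some (i*2+2)),
         acc.2 ++ PySem.List.slice row1 (some (i*2)) (some (i*2+2)))) acc) ([], [])
  [tb.1, tb.2]

-- ===== PRECONDITION & SPEC =====
-- Pre_ asks for at least two rows: on a one-row input with fewer than two columns A returns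
-- [[], []] only because the second row is never touched (there are no blocks), while B reads
-- both rows up front and raises IndexError there; on every other input with fewer than two
-- rows A itself raises IndexError.
def Pre_solution (numbers : List (List Int)) : Prop := 2 ≤ numbers.length
instance (numbers : List (List Int)) : Decidable (Pre_solution numbers) := by unfold Pre_solution; infer_instance
def pvWitness_solution : List (List Int) := [[1, 2], [3, 4]]

def Spec_solution (numbers : List (List Int)) (out : List (List Int)) : Prop := out = solution_alt numbers
instance (numbers : List (List Int)) (out : List (List Int)) : Decidable (Spec_solution numbers out) := by unfold Spec_solution; infer_instance

-- ===== CLAIM (what is proved, stated in full; the proofs are below) =====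
def Claim_equal_solution : Prop := ∀ (numbers : List (List Int)), Dom_solution numbers → Pre_solution numbers → Spec_solution numbers (solution numbers)

-- ===== LEMMAS AND PROOFS =====

-- the beauty key of block i, as both ports compute it
def keyOf (row0 row1 : List Int) (i : Int) : Int :=
  pyMex (PySem.Set.ofList (PySem.List.slice row0 (some (i*2)) (some (i*2+2)) ++
                           PySem.List.slice row1 (some (i*2)) (some (i*2+2))))

theorem keyOf_eq (row0 row1 : List Int) (i : Int) :
    pyMex (PySem.Set.ofList (PySem.List.slice row0 (some (i*2)) (some (i*2+2)) ++
                             PySem.List.slice row1 (some (i*2)) (some (i*2+2)))) = keyOf row0 row1 i := rfl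

theorem beautyA_pair (b0 b1 : List Int) :
    beautyA [b0, b1] = pyMex (PySem.Set.ofList (b0 ++ b1)) := by
  simp [beautyA, PySem.List.pyGetD]

theorem mexGo_ge (vals : List Int) (f : Nat) (i : Int) : i ≤ mexGo vals f i := by
  induction f generalizing i with
  | zero => simp [mexGo]
  | succ f ih =>
    simp only [mexGo]
    split
    · exact le_trans (by omega) (ih (i+1))
    · exact le_refl i

theorem mex_pigeon (vals : List Int) (i : Int) (h1 : 1 ≤ i)
    (h2 : ∀ j : Int, 1 ≤ j → j < i → j ∈ vals) : i ≤ (vals.length : Int) + 1 := by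
  have hsub : PySem.List.pyRange 1 i 1 ⊆ vals := by
    intro x hx
    rw [PySem.List.mem_pyRange_one] at hx
    exact h2 x hx.1 hx.2
  have := List.Subperm.length_le (List.subperm_of_subset (PySem.List.nodup_pyRange_one 1 i) hsub)
  rw [PySem.List.length_pyRange_one] at this
  omega

theorem mexGo_le (vals : List Int) (f : Nat) (i : Int)
    (h1 : 1 ≤ i) (h2 : ∀ j : Int, 1 ≤ j → j < i → j ∈ vals) :
    mexGo vals f i ≤ (vals.length : Int) + 1 := by
  induction f generalizing i with
  | zero => exact mex_pigeon vals i h1 h2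
  | succ f ih =>
    simp only [mexGo]
    split
    · rename_i h
      refine ih (i+1) (by omega) ?_
      intro j hj1 hj2
      rcases lt_or_eq_of_le (by omega : j ≤ i) with h' | h'
      · exact h2 j hj1 h'
      · subst h'; simpa using h
    · exact mex_pigeon vals i h1 h2

theorem length_slice_two (row : List Int) (i : Int) (hi : 0 ≤ i) :
    (PySem.List.slice row (some (i*2)) (some (i*2+2))).length ≤ 2 := by
  rw [PySem.List.slice_toNat row (by omega) (by omega)]
  have := List.length_take (i := (i*2+2).toNat - (i*2).toNat) (l := row.drop (i*2).toNat)
  omega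

theorem keyOf_bounds (row0 row1 : List Int) (i : Int) (hi : 0 ≤ i) :
    1 ≤ keyOf row0 row1 i ∧ keyOf row0 row1 i ≤ 5 := by
  set vals := PySem.Set.ofList (PySem.List.slice row0 (some (i*2)) (some (i*2+2)) ++
                           PySem.List.slice row1 (some (i*2)) (some (i*2+2))) with hv
  have hlen : vals.length ≤ 4 := by
    have h1 := PySem.Set.length_ofList_le (PySem.List.slice row0 (some (i*2)) (some (i*2+2)) ++
                           PySem.List.slice row1 (some (i*2)) (some (i*2+2)))
    have h2 := length_slice_two row0 i hi
    have h3 := length_slice_two row1 i hi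
    rw [← hv] at h1
    rw [List.length_append] at h1
    omega
  constructor
  · exact mexGo_ge vals _ 1
  · have := mexGo_le vals (vals.length + 1) 1 (by omega)
      (by intro j hj1 hj2; omega)
    calc keyOf row0 row1 i ≤ (vals.length : Int) + 1 := this
      _ ≤ 5 := by omega

theorem insertBy_append {α : Type} (before : α → α → Bool) (x : α) (A B : List α)
    (hA : ∀ a ∈ A, before x a = false) (hB : ∀ b ∈ B, before x b = true) :
    PySem.List.insertBy before x (A ++ B) = A ++ x :: B := by
  induction A with
  | nil =>
    cases B with
    | nil => simp [PySem.List.insertBy]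
    | cons b B' => simp [PySem.List.insertBy, hB b (by simp)]
  | cons a A' ih =>
    simp only [List.cons_append, PySem.List.insertBy, hA a (by simp)]
    simp only [Bool.false_eq_true, if_false]
    rw [ih (fun a ha => hA a (by simp [ha]))]

-- inserting x into the block decomposition appends it to the end of its own block
theorem ins_step {α : Type} (K : List Int) (hK : K.Pairwise (· < ·)) (k : α → Int)
    (x : α) (hx : k x ∈ K) (p : List α) :
    PySem.List.insertBy (fun a b => decide (k a < k b)) x
        (K.flatMap (fun v => p.filter (fun y => k y == v)))
      = K.flatMap (fun v => (p ++ [x]).filter (fun y => k y == v)) := by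
  obtain ⟨K1, K2, rfl⟩ := List.append_of_mem hx
  rw [List.pairwise_append] at hK
  obtain ⟨hK1, hK2', hcross⟩ := hK
  rw [List.pairwise_cons] at hK2'
  obtain ⟨hlt2, hK2⟩ := hK2'
  have hne1 : ∀ v ∈ K1, k x ≠ v := fun v hv => ne_of_gt (hcross v hv (k x) (by simp))
  have hne2 : ∀ v ∈ K2, k x ≠ v := fun v hv => ne_of_lt (hlt2 v hv)
  rw [List.flatMap_append, List.flatMap_cons]
  rw [← List.append_assoc]
  rw [insertBy_append (fun a b => decide (k a < k b)) x
        (K1.flatMap (fun v => p.filter (fun y => k y == v)) ++ p.filter (fun y => k y == k x))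
        (K2.flatMap (fun v => p.filter (fun y => k y == v)))
        ?_ ?_]
  · rw [List.flatMap_append, List.flatMap_cons]
    have e1 : K1.flatMap (fun v => (p ++ [x]).filter (fun y => k y == v))
        = K1.flatMap (fun v => p.filter (fun y => k y == v)) := by
      apply List.flatMap_congr
      intro v hv
      rw [List.filter_append]
      simp [hne1 v hv]
    have e2 : K2.flatMap (fun v => (p ++ [x]).filter (fun y => k y == v))
        = K2.flatMap (fun v => p.filter (fun y => k y == v)) := by
      apply List.flatMap_congr
      intro v hv
      rw [List.filter_append]
      simp [hne2 v hv]
    have e3 : (p ++ [x]).filter (fun y => k y == k x) = p.filter (fun y => k y == k x) ++ [x] := by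
      rw [List.filter_append]; simp
    rw [e1, e2, e3]
    simp [List.append_assoc]
  · intro a ha
    simp only [List.mem_append, List.mem_flatMap, List.mem_filter] at ha
    rcases ha with ⟨v, hv, _, hkv⟩ | ⟨_, hkv⟩
    · have : k a = v := by simpa using hkv
      simp [this]
      exact le_of_lt (hcross v hv (k x) (by simp))
    · have : k a = k x := by simpa using hkv
      simp [this]
  · intro b hb
    simp only [List.mem_flatMap, List.mem_filter] at hb
    obtain ⟨v, hv, _, hkv⟩ := hb
    have : k b = v := by simpa using hkv
    simp [this]
    exact hlt2 v hv

theorem sorted_fold_blocks {α : Type} (K : List Int) (hK : K.Pairwise (· < ·)) (k : α → Int)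
    (xs : List α) : ∀ p : List α, (∀ x ∈ xs, k x ∈ K) →
    xs.foldl (fun acc x => PySem.List.insertBy (fun a b => decide (k a < k b)) x acc)
        (K.flatMap (fun v => p.filter (fun y => k y == v)))
      = K.flatMap (fun v => (p ++ xs).filter (fun y => k y == v)) := by
  induction xs with
  | nil => intro p _; simp
  | cons x xs ih =>
    intro p h
    simp only [List.foldl_cons]
    rw [ins_step K hK k x (h x (by simp)) p]
    rw [ih (p ++ [x]) (fun y hy => h y (by simp [hy]))]
    simp

-- a stable sort whose keys all lie in the strictly increasing list K is the
-- concatenation, over K, of the key-classes in original order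
theorem sorted_eq_flatMap_filter {α : Type} (K : List Int) (hK : K.Pairwise (· < ·))
    (k : α → Int) (xs : List α) (h : ∀ x ∈ xs, k x ∈ K) :
    PySem.List.sorted xs k false = K.flatMap (fun v => xs.filter (fun x => k x == v)) := by
  rw [PySem.List.sorted_eq_foldl_insertBy]
  have h0 := sorted_fold_blocks K hK k xs [] h
  have e : K.flatMap (fun v => ([] : List α).filter (fun y => k y == v)) = [] := by simp
  rw [e, List.nil_append] at h0
  exact h0

-- a fold appending to both components of a pair is a pair of flatMaps
theorem foldl_pair_append {β : Type} (l : List β) (f g : β → List Int) (a b : List Int) :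
    l.foldl (fun (acc : List Int × List Int) x => (acc.1 ++ f x, acc.2 ++ g x)) (a, b)
      = (a ++ l.flatMap f, b ++ l.flatMap g) := by
  induction l generalizing a b with
  | nil => simp
  | cons x l ih => simp [ih, List.flatMap_cons]

theorem bucket_step (row0 row1 : List Int) (x : Int) (hx : 0 ≤ x) (p : List Int) :
    PySem.List.pySetD (([1,2,3,4,5] : List Int).map (fun v => p.filter (fun i => keyOf row0 row1 i == v)))
        (keyOf row0 row1 x - 1)
        (PySem.List.pyGetD (([1,2,3,4,5] : List Int).map (fun v => p.filter (fun i => keyOf row0 row1 i == v)))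
          (keyOf row0 row1 x - 1) [] ++ [x])
      = (([1,2,3,4,5] : List Int).map (fun v => (p ++ [x]).filter (fun i => keyOf row0 row1 i == v))) := by
  obtain ⟨hm1, hm5⟩ := keyOf_bounds row0 row1 x hx
  set m := keyOf row0 row1 x with hm
  have hfe : ∀ v : Int, (p ++ [x]).filter (fun i => keyOf row0 row1 i == v)
      = p.filter (fun i => keyOf row0 row1 i == v) ++ if m == v then [x] else [] := by
    intro v
    rw [List.filter_append]
    simp only [List.filter_cons, List.filter_nil, ← hm]
  simp only [hfe]
  interval_cases m <;>
    simp [PySem.List.pySetD, PySem.List.pySet?, PySem.List.pyGetD, PySem.List.pyGet?,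
          PySem.List.pyIdx?, List.map_cons, List.map_nil]

-- B's bucket fold builds exactly the five key-classes of the processed indices
theorem buckets_fold (row0 row1 : List Int) (l : List Int) : ∀ p : List Int, (∀ i ∈ l, 0 ≤ i) →
    l.foldl (fun (bs : List (List Int)) i =>
        PySem.List.pySetD bs (keyOf row0 row1 i - 1)
          (PySem.List.pyGetD bs (keyOf row0 row1 i - 1) [] ++ [i]))
      (([1,2,3,4,5] : List Int).map (fun v => p.filter (fun i => keyOf row0 row1 i == v)))
      = ([1,2,3,4,5] : List Int).map (fun v => (p ++ l).filter (fun i => keyOf row0 row1 i == v)) := by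
  induction l with
  | nil => intro p _; simp
  | cons x l ih =>
    intro p h
    simp only [List.foldl_cons]
    rw [bucket_step row0 row1 x (h x (by simp)) p]
    rw [ih (p ++ [x]) (fun y hy => h y (by simp [hy]))]
    simp

theorem buckets_eq (row0 row1 : List Int) (l : List Int) (hl : ∀ i ∈ l, 0 ≤ i) :
    l.foldl (fun (bs : List (List Int)) i =>
        PySem.List.pySetD bs (keyOf row0 row1 i - 1)
          (PySem.List.pyGetD bs (keyOf row0 row1 i - 1) [] ++ [i]))
      [[], [], [], [], []]
      = ([1, 2, 3, 4, 5] : List Int).map (fun v => l.filter (fun i => keyOf row0 row1 i == v)) := by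
  have h0 := buckets_fold row0 row1 l [] hl
  simpa using h0

theorem main_core (r0 r1 : List Int) (l : List Int) (hl : ∀ i ∈ l, 0 ≤ i) :
    ([(List.foldl (fun (acc : List Int × List Int) p =>
          (acc.1 ++ PySem.List.slice r0 (some (p.2*2)) (some (p.2*2+2)),
           acc.2 ++ PySem.List.slice r1 (some (p.2*2)) (some (p.2*2+2)))) ([], [])
          (PySem.List.sorted (l.map (fun i => (keyOf r0 r1 i, i))) (fun x => x.1) false)).1,
      (List.foldl (fun (acc : List Int × List Int) p =>
          (acc.1 ++ PySem.List.slice r0 (some (p.2*2)) (some (p.2*2+2)),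
           acc.2 ++ PySem.List.slice r1 (some (p.2*2)) (some (p.2*2+2)))) ([], [])
          (PySem.List.sorted (l.map (fun i => (keyOf r0 r1 i, i))) (fun x => x.1) false)).2]
      : List (List Int))
    = [(List.foldl
          (fun (acc : List Int × List Int) bucket => List.foldl
              (fun (acc : List Int × List Int) i =>
                (acc.1 ++ PySem.List.slice r0 (some (i*2)) (some (i*2+2)),
                 acc.2 ++ PySem.List.slice r1 (some (i*2)) (some (i*2+2)))) acc bucket)
          ([], [])
          (List.foldl (fun (bs : List (List Int)) i =>
              PySem.List.pySetD bs (keyOf r0 r1 i - 1)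
                (PySem.List.pyGetD bs (keyOf r0 r1 i - 1) [] ++ [i]))
            [[], [], [], [], []] l)).1,
       (List.foldl
          (fun (acc : List Int × List Int) bucket => List.foldl
              (fun (acc : List Int × List Int) i =>
                (acc.1 ++ PySem.List.slice r0 (some (i*2)) (some (i*2+2)),
                 acc.2 ++ PySem.List.slice r1 (some (i*2)) (some (i*2+2)))) acc bucket)
          ([], [])
          (List.foldl (fun (bs : List (List Int)) i =>
              PySem.List.pySetD bs (keyOf r0 r1 i - 1)
                (PySem.List.pyGetD bs (keyOf r0 r1 i - 1) [] ++ [i]))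
            [[], [], [], [], []] l)).2] := by
  have hmem : ∀ x ∈ l.map (fun i => (keyOf r0 r1 i, i)), (fun (x : Int × Int) => x.1) x ∈ ([1,2,3,4,5] : List Int) := by
    intro x hx
    obtain ⟨i, hi, rfl⟩ := List.mem_map.1 hx
    obtain ⟨b1, b5⟩ := keyOf_bounds r0 r1 i (hl i hi)
    simp only [List.mem_cons, List.not_mem_nil, or_false]
    omega
  rw [sorted_eq_flatMap_filter (α := Int × Int) ([1,2,3,4,5] : List Int) (by decide) (fun x => x.1) (l.map (fun i => (keyOf r0 r1 i, i))) hmem]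
  rw [buckets_eq r0 r1 l hl]
  rw [foldl_pair_append]
  have hout : (fun (acc : List Int × List Int) (bucket : List Int) => List.foldl
              (fun (acc : List Int × List Int) i =>
                (acc.1 ++ PySem.List.slice r0 (some (i*2)) (some (i*2+2)),
                 acc.2 ++ PySem.List.slice r1 (some (i*2)) (some (i*2+2)))) acc bucket)
      = (fun (acc : List Int × List Int) (bucket : List Int) =>
          (acc.1 ++ bucket.flatMap (fun i => PySem.List.slice r0 (some (i*2)) (some (i*2+2))),
           acc.2 ++ bucket.flatMap (fun i => PySem.List.slice r1 (some (i*2)) (some (i*2+2))))) := by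
    funext acc bucket
    rw [← Prod.mk.eta (p := acc), foldl_pair_append]
  rw [hout, foldl_pair_append]
  simp [List.flatMap_map, List.filter_map]
  exact ⟨rfl, rfl⟩

theorem ports_eq (numbers : List (List Int)) : solution numbers = solution_alt numbers := by
  unfold solution solution_alt
  simp only [beautyA_pair, keyOf_eq]
  exact main_core _ _ _ (fun i hi => ((PySem.List.mem_pyRange_one).1 hi).1)

-- ===== VERDICT (by name: the statement is the Claim_ definition above) =====
theorem solution_spec : Claim_equal_solution := by
  intro numbers _ _
  unfold Spec_solution
  exact ports_eq numbers
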